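-- pv_equiv track=rewrite | github.com/daniel-sciome/rlm-bmdx | pdf_text/parse_pdf.py | _parse_string_literal
-- ===== SOURCE A (Python) =====
-- def _parse_string_literal(s: str) -> str:
--     """
--     Parse a PDF string literal (parenthesised), handling escape sequences.
--
--     PDF string escapes (Table 3 in the spec):
--         \\n  -> newline
--         \\r  -> carriage return
--         \\t  -> tab
--         \\b  -> backspace
--         \\f  -> form feed
--         \\(  -> literal (
--         \\)  -> literal )
--         \\\\  -> literal backslash
--         \\DDD -> octal character code (1-3 digits)
--
--     Balanced parentheses inside the string do NOT need escaping —
--     the parser counts nesting depth. We handle that in the tokenizer;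
--     by the time we get here, the string boundaries are already resolved.
--
--     Why this matters: TJ arrays contain these string literals, and
--     octal escapes like \\256 encode special characters (e.g., ®).
--     """
--     result = []
--     i = 0
--     while i < len(s):
--         ch = s[i]
--         if ch == '\\' and i + 1 < len(s):
--             next_ch = s[i + 1]
--             if next_ch == 'n':
--                 result.append('\n')
--                 i += 2
--             elif next_ch == 'r':
--                 result.append('\r')
--                 i += 2
--             elif next_ch == 't':
--                 result.append('\t')
--                 i += 2
--             elif next_ch == 'b':
--                 result.append('\b')
--                 i += 2
--             elif next_ch == 'f':
--                 result.append('\f')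
--                 i += 2
--             elif next_ch == '(':
--                 result.append('(')
--                 i += 2
--             elif next_ch == ')':
--                 result.append(')')
--                 i += 2
--             elif next_ch == '\\':
--                 result.append('\\')
--                 i += 2
--             elif next_ch.isdigit():
--                 # Octal escape: 1-3 octal digits
--                 octal = next_ch
--                 j = i + 2
--                 while j < len(s) and j < i + 4 and s[j].isdigit() and s[j] in '01234567':
--                     octal += s[j]
--                     j += 1
--                 result.append(chr(int(octal, 8)))
--                 i = j
--             elif next_ch == '\n':
--                 # Backslash at end of line: line continuation
--                 i += 2
--             elif next_ch == '\r':
--                 # Line continuation (CR or CRLF)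
--                 i += 2
--                 if i < len(s) and s[i] == '\n':
--                     i += 1
--             else:
--                 # Unknown escape — just include the character.
--                 result.append(next_ch)
--                 i += 2
--         else:
--             result.append(ch)
--             i += 1
--     return ''.join(result)
-- ===== SOURCE B (Python) =====
-- def _parse_string_literal(s: str) -> str:
--     """Decode a PDF string literal by splitting on backslash: each subsequent
--     piece starts with the escaped character, decoded by a small dispatch."""
--     _MAP = {'n': '\n', 'r': '\r', 't': '\t', 'b': '\b', 'f': '\f',
--             '(': '(', ')': ')'}
--     parts = s.split('\\')
--     out = [parts[0]]
--     n = len(parts)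
--     k = 1
--     while k < n:
--         p = parts[k]
--         if p == '':
--             # the backslash escaped another backslash (or ended the string)
--             out.append('\\')
--             if k + 1 < n:
--                 out.append(parts[k + 1])
--                 k += 2
--             else:
--                 k += 1
--         else:
--             c = p[0]
--             if c in _MAP:
--                 out.append(_MAP[c] + p[1:])
--             elif c.isdigit():
--                 m = 1
--                 while m < 3 and m < len(p) and p[m] in '01234567':
--                     m += 1
--                 out.append(chr(int(p[:m], 8)) + p[m:])
--             elif c == '\n':
--                 out.append(p[1:])
--             elif c == '\r':
--                 rest = p[1:]
--                 if rest.startswith('\n'):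
--                     rest = rest[1:]
--                 out.append(rest)
--             else:
--                 out.append(p)
--             k += 1
--     return ''.join(out)
-- ===== Notes on version B (the rewrite author's own statement) =====
-- stated objective: faster
-- what changed: B replaces A's single index-driven while loop (manual i advances of 1-4 with per-character branching) with a split-on-backslash decoder: one s.split('\\') pass, then each piece after a backslash is decoded at its head (dict dispatch for named escapes, capped octal prefix, line continuations), empty pieces encoding escaped backslashes.
import Mathlib
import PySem

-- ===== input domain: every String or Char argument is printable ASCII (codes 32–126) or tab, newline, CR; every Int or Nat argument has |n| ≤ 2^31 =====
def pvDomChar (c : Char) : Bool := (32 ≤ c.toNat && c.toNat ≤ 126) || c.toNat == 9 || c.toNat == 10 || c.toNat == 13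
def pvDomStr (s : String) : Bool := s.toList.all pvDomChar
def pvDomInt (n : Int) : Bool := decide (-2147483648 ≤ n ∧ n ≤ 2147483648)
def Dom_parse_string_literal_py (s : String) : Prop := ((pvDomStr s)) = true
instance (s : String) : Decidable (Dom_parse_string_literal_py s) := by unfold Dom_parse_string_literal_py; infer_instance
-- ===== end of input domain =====

-- B decodes by splitting the input on backslash (one str.split plus a scan of the
-- pieces) instead of A's index-driven per-character while loop; same return value on
-- Pre_; a timing run measured B faster (bulk split vs per-character stepping).

-- ===== PORT A =====
-- digit value of an ASCII digit char (int(octal, 8) digit; on '8'/'9' Python raises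
-- ValueError — such inputs are excluded by Pre_ below, here the port returns 8/9)
def pvOctD (c : Char) : Nat := c.toNat - 48

def pvIsOct (c : Char) : Bool := '0' ≤ c && c ≤ '7'

-- A's while loop over index i, transcribed as structural recursion on the remaining chars
def pvGoA : List Char → List Char
  | [] => []
  | ['\\'] => ['\\']                 -- ch = '\' with i+1 = len: the else branch appends ch
  | '\\' :: c :: rest =>
    if c = 'n' then '\n' :: pvGoA rest
    else if c = 'r' then '\r' :: pvGoA rest
    else if c = 't' then '\t' :: pvGoA rest
    else if c = 'b' then '\x08' :: pvGoA rest
    else if c = 'f' then '\x0c' :: pvGoA rest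
    else if c = '(' then '(' :: pvGoA rest
    else if c = ')' then ')' :: pvGoA rest
    else if c = '\\' then '\\' :: pvGoA rest
    else if c.isDigit then
      -- octal: collect up to 2 more digits that are in '01234567'
      match rest with
      | d1 :: r1 =>
        if pvIsOct d1 then
          match r1 with
          | d2 :: r2 =>
            if pvIsOct d2 then Char.ofNat (8 * (8 * pvOctD c + pvOctD d1) + pvOctD d2) :: pvGoA r2
            else Char.ofNat (8 * pvOctD c + pvOctD d1) :: pvGoA (d2 :: r2)
          | [] => Char.ofNat (8 * pvOctD c + pvOctD d1) :: pvGoA []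
        else Char.ofNat (pvOctD c) :: pvGoA (d1 :: r1)
      | [] => Char.ofNat (pvOctD c) :: pvGoA []
    else if c = '\n' then pvGoA rest
    else if c = '\r' then
      match rest with
      | '\n' :: r => pvGoA r
      | r => pvGoA r
    else c :: pvGoA rest
  | c :: rest => c :: pvGoA rest
termination_by cs => cs.length
decreasing_by all_goals simp <;> omega

def parse_string_literal_py (s : String) : String := String.ofList (pvGoA s.toList)

-- ===== PORT B =====
-- s.split('\\')  (Python str.split with a one-char separator), on the char list
def pvSplitB : List Char → List (List Char)
  | [] => [[]]
  | c :: cs =>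
    if c = '\\' then [] :: pvSplitB cs
    else
      match pvSplitB cs with
      | h :: t => (c :: h) :: t
      | [] => [[c]]            -- unreachable: pvSplitB never returns []

-- the _MAP dict of B
def pvEscMap : List (Char × Char) :=
  [('n', '\n'), ('r', '\r'), ('t', '\t'), ('b', '\x08'), ('f', '\x0c'), ('(', '('), (')', ')')]

-- decode one nonempty piece p (it follows a backslash): B's else branch
def pvDecodeB (p : List Char) : List Char :=
  match p with
  | [] => []
  | c :: t =>
    match pvEscMap.lookup c with
    | some e => e :: t
    | none =>
      if c.isDigit then
        let ds := (t.take 2).takeWhile pvIsOct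
        Char.ofNat ((c :: ds).foldl (fun a d => 8 * a + pvOctD d) 0) :: t.drop ds.length
      else if c = '\n' then t
      else if c = '\r' then
        if t.head? = some '\n' then t.tail else t
      else p

-- B's while loop over parts[1:], two-step advance when a piece is empty
def pvGoB : List (List Char) → List Char
  | [] => []
  | [[]] => ['\\']
  | [] :: q :: ps => '\\' :: (q ++ pvGoB ps)
  | p :: ps => pvDecodeB p ++ pvGoB ps

def parse_string_literal_py_alt (s : String) : String :=
  match pvSplitB s.toList with
  | p0 :: ps => String.ofList (p0 ++ pvGoB ps)
  | [] => ""                   -- unreachable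

-- ===== PRECONDITION & SPEC =====
-- Pre_ excludes exactly the inputs where Python A raises ValueError: a '8' or '9'
-- preceded by an odd run of backslashes, i.e. an escape sequence "\8" or "\9"
-- (int('8'/'9', 8) fails). B raises the same ValueError there.
def Pre_parse_string_literal_py (s : String) : Prop :=
  ∀ i, i < s.toList.length →
    (s.toList.getD i ' ' = '8' ∨ s.toList.getD i ' ' = '9') →
    (((s.toList.take i).reverse.takeWhile (fun c => c = '\\')).length) % 2 = 0
instance (s : String) : Decidable (Pre_parse_string_literal_py s) := by
  unfold Pre_parse_string_literal_py; infer_instance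

def pvWitness_parse_string_literal_py : String := "a\\101\\(b\\\\8)"

def Spec_parse_string_literal_py (s : String) (out : String) : Prop := out = parse_string_literal_py_alt s
instance (s : String) (out : String) : Decidable (Spec_parse_string_literal_py s out) := by unfold Spec_parse_string_literal_py; infer_instance

-- ===== CLAIM (what is proved, stated in full; the proofs are below) =====
def Claim_equal_parse_string_literal_py : Prop := ∀ (s : String), Dom_parse_string_literal_py s → Pre_parse_string_literal_py s → Spec_parse_string_literal_py s (parse_string_literal_py s)

-- ===== LEMMAS AND PROOFS =====

-- B's result as a function of the char list
def pvBfun (cs : List Char) : List Char :=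
  match pvSplitB cs with
  | p0 :: ps => p0 ++ pvGoB ps
  | [] => []

theorem pvSplitB_ne_nil (cs : List Char) : pvSplitB cs ≠ [] := by
  cases cs with
  | nil => simp [pvSplitB]
  | cons c cs =>
    simp only [pvSplitB]
    split
    · simp
    · split <;> simp_all

theorem pvSplitB_no_bs (u : List Char) (h : '\\' ∉ u) : pvSplitB u = [u] := by
  induction u with
  | nil => simp [pvSplitB]
  | cons c cs ih =>
    simp only [List.mem_cons, not_or] at h
    simp [pvSplitB, Ne.symm h.1, ih h.2]

theorem pvSplitB_append (u v : List Char) (h : '\\' ∉ u) :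
    pvSplitB (u ++ '\\' :: v) = u :: pvSplitB v := by
  induction u with
  | nil => simp [pvSplitB]
  | cons c cs ih =>
    simp only [List.mem_cons, not_or] at h
    simp [pvSplitB, Ne.symm h.1, ih h.2]

theorem pvSplitB_inv (cs h : List Char) (t : List (List Char)) (hs : pvSplitB cs = h :: t) :
    '\\' ∉ h ∧ ((cs = h ∧ t = []) ∨ ∃ v, cs = h ++ '\\' :: v ∧ t = pvSplitB v) := by
  induction cs generalizing h t with
  | nil =>
    rw [show pvSplitB [] = [[]] from rfl] at hs
    simp only [List.cons.injEq] at hs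
    obtain ⟨rfl, rfl⟩ := hs
    simp
  | cons c cs ih =>
    by_cases hc : c = '\\'
    · subst hc
      rw [show pvSplitB ('\\' :: cs) = [] :: pvSplitB cs from by simp [pvSplitB]] at hs
      simp only [List.cons.injEq] at hs
      obtain ⟨rfl, rfl⟩ := hs
      exact ⟨by simp, Or.inr ⟨cs, by simp, rfl⟩⟩
    · cases hsp : pvSplitB cs with
      | nil => exact absurd hsp (pvSplitB_ne_nil cs)
      | cons h2 t2 =>
        rw [show pvSplitB (c :: cs) = (c :: h2) :: t2 from by simp [pvSplitB, hc, hsp]] at hs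
        simp only [List.cons.injEq] at hs
        obtain ⟨rfl, rfl⟩ := hs
        obtain ⟨hnb, hrest⟩ := ih h2 t2 hsp
        refine ⟨by simp [hnb, Ne.symm hc], ?_⟩
        rcases hrest with ⟨rfl, rfl⟩ | ⟨v, rfl, rfl⟩
        · exact Or.inl ⟨rfl, rfl⟩
        · exact Or.inr ⟨v, rfl, rfl⟩

theorem pvBfun_split {cs hh : List Char} {t : List (List Char)} (h : pvSplitB cs = hh :: t) :
    pvBfun cs = hh ++ pvGoB t := by simp [pvBfun, h]

theorem pvBfun_cons_ne {c : Char} {cs : List Char} (hc : c ≠ '\\') :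
    pvBfun (c :: cs) = c :: pvBfun cs := by
  cases hs : pvSplitB cs with
  | nil => exact absurd hs (pvSplitB_ne_nil cs)
  | cons h t => simp [pvBfun, pvSplitB, hc, hs]

theorem pvBfun_bs (cs : List Char) : pvBfun ('\\' :: cs) = pvGoB (pvSplitB cs) := by
  cases hs : pvSplitB cs with
  | nil => exact absurd hs (pvSplitB_ne_nil cs)
  | cons h t => simp [pvBfun, pvSplitB, hs]

theorem pvGoB_cons {p : List Char} {ps : List (List Char)} (h : p ≠ []) :
    pvGoB (p :: ps) = pvDecodeB p ++ pvGoB ps := by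
  cases p with
  | nil => exact absurd rfl h
  | cons c q => cases ps <;> simp [pvGoB]

-- one escape step: backslash followed by c ≠ '\\'
theorem pvEscapeStep (c : Char) (hcb : c ≠ '\\') (cs' h : List Char) (t : List (List Char))
    (hs : pvSplitB cs' = h :: t)
    (IH : ∀ u : List Char, u.length ≤ cs'.length → pvGoA u = pvBfun u) :
    pvGoA ('\\' :: c :: cs') = pvDecodeB (c :: h) ++ pvGoB t := by
  obtain ⟨hnb, hinv⟩ := pvSplitB_inv cs' h t hs
  have hIHcs : pvGoA cs' = h ++ pvGoB t := by
    rw [IH cs' le_rfl, pvBfun_split hs]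
  by_cases hn : c = 'n'
  · subst hn
    rw [show pvGoA ('\\' :: 'n' :: cs') = '\n' :: pvGoA cs' from by rw [pvGoA.eq_def]; simp]
    simp [pvDecodeB, pvEscMap, hIHcs]
  by_cases hr : c = 'r'
  · subst hr
    rw [show pvGoA ('\\' :: 'r' :: cs') = '\r' :: pvGoA cs' from by rw [pvGoA.eq_def]; simp]
    simp [pvDecodeB, pvEscMap, List.lookup, hIHcs]
  by_cases ht : c = 't'
  · subst ht
    rw [show pvGoA ('\\' :: 't' :: cs') = '\t' :: pvGoA cs' from by rw [pvGoA.eq_def]; simp]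
    simp [pvDecodeB, pvEscMap, List.lookup, hIHcs]
  by_cases hb : c = 'b'
  · subst hb
    rw [show pvGoA ('\\' :: 'b' :: cs') = '\x08' :: pvGoA cs' from by rw [pvGoA.eq_def]; simp]
    simp [pvDecodeB, pvEscMap, List.lookup, hIHcs]
  by_cases hf : c = 'f'
  · subst hf
    rw [show pvGoA ('\\' :: 'f' :: cs') = '\x0c' :: pvGoA cs' from by rw [pvGoA.eq_def]; simp]
    simp [pvDecodeB, pvEscMap, List.lookup, hIHcs]
  by_cases hop : c = '('
  · subst hop
    rw [show pvGoA ('\\' :: '(' :: cs') = '(' :: pvGoA cs' from by rw [pvGoA.eq_def]; simp]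
    simp [pvDecodeB, pvEscMap, List.lookup, hIHcs]
  by_cases hcp : c = ')'
  · subst hcp
    rw [show pvGoA ('\\' :: ')' :: cs') = ')' :: pvGoA cs' from by rw [pvGoA.eq_def]; simp]
    simp [pvDecodeB, pvEscMap, List.lookup, hIHcs]
  have hlk : pvEscMap.lookup c = none := by
    have e1 : (c == 'n') = false := beq_eq_false_iff_ne.mpr hn
    have e2 : (c == 'r') = false := beq_eq_false_iff_ne.mpr hr
    have e3 : (c == 't') = false := beq_eq_false_iff_ne.mpr ht
    have e4 : (c == 'b') = false := beq_eq_false_iff_ne.mpr hb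
    have e5 : (c == 'f') = false := beq_eq_false_iff_ne.mpr hf
    have e6 : (c == '(') = false := beq_eq_false_iff_ne.mpr hop
    have e7 : (c == ')') = false := beq_eq_false_iff_ne.mpr hcp
    simp [pvEscMap, List.lookup, e1, e2, e3, e4, e5, e6, e7]
  have hbs : pvIsOct '\\' = false := by decide
  by_cases hd : c.isDigit
  · -- octal escape
    cases h with
    | nil =>
      rcases hinv with ⟨rfl, rfl⟩ | ⟨v, rfl, rfl⟩
      · rw [pvGoA.eq_def]
        simp [pvDecodeB, hlk, hd, hn, hr, ht, hb, hf, hop, hcp, hcb, pvGoA, pvGoB]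
      · have hv := IH ('\\' :: v) (by simp)
        rw [pvBfun_bs] at hv
        rw [pvGoA.eq_def]
        simp [pvDecodeB, hlk, hd, hn, hr, ht, hb, hf, hop, hcp, hcb, hbs, hv]
    | cons d1 h1 =>
      simp only [List.mem_cons, not_or] at hnb
      by_cases ho1 : pvIsOct d1
      case neg =>
        rcases hinv with ⟨rfl, rfl⟩ | ⟨v, rfl, rfl⟩ <;>
          (simp only [List.cons_append] at hIHcs
           rw [pvGoA.eq_def]
           simp [pvDecodeB, hlk, hd, hn, hr, ht, hb, hf, hop, hcp, hcb, ho1, hIHcs])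
      case pos =>
        cases h1 with
        | nil =>
          rcases hinv with ⟨rfl, rfl⟩ | ⟨v, rfl, rfl⟩
          · rw [pvGoA.eq_def]
            simp [pvDecodeB, hlk, hd, hn, hr, ht, hb, hf, hop, hcp, hcb, ho1, pvGoA, pvGoB]
          · have hv := IH ('\\' :: v) (by simp)
            rw [pvBfun_bs] at hv
            rw [pvGoA.eq_def]
            simp [pvDecodeB, hlk, hd, hn, hr, ht, hb, hf, hop, hcp, hcb, ho1, hbs, hv]
        | cons d2 h2 =>
          by_cases ho2 : pvIsOct d2
          have hnb2 : '\\' ∉ h2 := fun hm => hnb.2 (List.mem_cons_of_mem _ hm)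
          case neg =>
            rcases hinv with ⟨rfl, rfl⟩ | ⟨v, rfl, rfl⟩
            · have hsub : pvSplitB (d2 :: h2) = [d2 :: h2] := pvSplitB_no_bs _ hnb.2
              have hg := IH (d2 :: h2) (by simp only [List.length_cons]; omega)
              rw [pvBfun_split hsub] at hg
              rw [pvGoA.eq_def]
              simp [pvDecodeB, hlk, hd, hn, hr, ht, hb, hf, hop, hcp, hcb, ho1, ho2, hg, pvGoB]
            · have hsub : pvSplitB (d2 :: h2 ++ '\\' :: v) = (d2 :: h2) :: pvSplitB v :=
                pvSplitB_append _ _ hnb.2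
              have hg := IH (d2 :: h2 ++ '\\' :: v)
                (by simp only [List.length_cons, List.length_append]; omega)
              rw [pvBfun_split hsub] at hg
              simp only [List.cons_append] at hg
              rw [pvGoA.eq_def]
              simp [pvDecodeB, hlk, hd, hn, hr, ht, hb, hf, hop, hcp, hcb, ho1, ho2, hg]
          case pos =>
            rcases hinv with ⟨rfl, rfl⟩ | ⟨v, rfl, rfl⟩
            · have hsub : pvSplitB h2 = [h2] := pvSplitB_no_bs _ hnb2
              have hg := IH h2 (by simp only [List.length_cons]; omega)
              rw [pvBfun_split hsub] at hg
              rw [pvGoA.eq_def]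
              simp [pvDecodeB, hlk, hd, hn, hr, ht, hb, hf, hop, hcp, hcb, ho1, ho2, hg, pvGoB]
            · have hsub : pvSplitB (h2 ++ '\\' :: v) = h2 :: pvSplitB v :=
                pvSplitB_append _ _ hnb2
              have hg := IH (h2 ++ '\\' :: v)
                (by simp only [List.length_cons, List.length_append]; omega)
              rw [pvBfun_split hsub] at hg
              rw [pvGoA.eq_def]
              simp [pvDecodeB, hlk, hd, hn, hr, ht, hb, hf, hop, hcp, hcb, ho1, ho2, hg]
  by_cases hnl : c = '\n'
  · subst hnl
    rw [show pvGoA ('\\' :: '\n' :: cs') = pvGoA cs' from by rw [pvGoA.eq_def]; simp]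
    simp [pvDecodeB, hlk, hIHcs]
  by_cases hcr : c = '\r'
  · subst hcr
    cases cs' with
    | nil =>
      rw [show pvSplitB [] = [[]] from rfl] at hs
      simp only [List.cons.injEq] at hs
      obtain ⟨rfl, rfl⟩ := hs
      rw [pvGoA.eq_def]
      simp [pvDecodeB, hlk, pvGoA, pvGoB]
    | cons x v =>
      by_cases hx : x = '\n'
      · subst hx
        cases hsv : pvSplitB v with
        | nil => exact absurd hsv (pvSplitB_ne_nil v)
        | cons h2 t2 =>
          rw [show pvSplitB ('\n' :: v) = ('\n' :: h2) :: t2 from by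
                simp [pvSplitB, hsv]] at hs
          simp only [List.cons.injEq] at hs
          obtain ⟨rfl, rfl⟩ := hs
          have hg := IH v (by simp)
          rw [pvBfun_split hsv] at hg
          rw [pvGoA.eq_def]
          simp [pvDecodeB, hlk, hg]
      · have hhd : ¬ (h.head? = some '\n') := by
          rcases hinv with ⟨heq, rfl⟩ | ⟨v2, heq, rfl⟩
          · cases h with
            | nil => simp
            | cons a h' =>
              have hax : a = x := by
                have := heq.symm
                simp only [List.cons.injEq] at this
                exact this.1
              simp [hax, hx]
          · cases h with
            | nil => simp
            | cons a h' =>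
              have hax : a = x := by
                have := heq
                simp only [List.cons_append, List.cons.injEq] at this
                exact this.1.symm
              simp [hax, hx]
        rw [show pvGoA ('\\' :: '\r' :: x :: v) = pvGoA (x :: v) from by
              rw [pvGoA.eq_def]; simp [hx]]
        have hB : pvDecodeB ('\r' :: h) = h := by
          simp [pvDecodeB, hlk, hhd]
        rw [hB, ← pvBfun_split hs]
        exact IH (x :: v) le_rfl
  · -- unknown escape: keep the character
    rw [show pvGoA ('\\' :: c :: cs') = c :: pvGoA cs' from by
          rw [pvGoA.eq_def]
          simp [hn, hr, ht, hb, hf, hop, hcp, hcb, hd, hnl, hcr]]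
    simp [pvDecodeB, hlk, hd, hnl, hcr, hIHcs]

theorem pvMain : ∀ cs : List Char, pvGoA cs = pvBfun cs := by
  intro cs0
  induction h0 : cs0.length using Nat.strong_induction_on generalizing cs0 with
  | _ n ihn =>
  subst h0
  have IH : ∀ cs' : List Char, cs'.length < cs0.length → pvGoA cs' = pvBfun cs' :=
    fun cs' h => ihn _ h cs' rfl
  clear ihn
  match cs0 with
  | [] => simp [pvGoA, pvBfun, pvSplitB, pvGoB]
  | c :: cs =>
    by_cases hc : c = '\\'
    case neg =>
      have hA : pvGoA (c :: cs) = c :: pvGoA cs := by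
        cases cs <;> (rw [pvGoA.eq_def]; simp [hc])
      rw [hA, pvBfun_cons_ne hc, IH cs (by simp)]
    case pos =>
      subst hc
      match cs with
      | [] => simp [pvGoA, pvBfun, pvSplitB, pvGoB]
      | c :: cs' =>
        rw [pvBfun_bs]
        by_cases hcb : c = '\\'
        · subst hcb
          have hA : pvGoA ('\\' :: '\\' :: cs') = '\\' :: pvGoA cs' := by
            rw [pvGoA.eq_def]; simp
          cases hs : pvSplitB cs' with
          | nil => exact absurd hs (pvSplitB_ne_nil cs')
          | cons h t =>
            rw [show pvSplitB ('\\' :: cs') = [] :: h :: t from by simp [pvSplitB, hs]]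
            rw [hA, IH cs' (by simp), pvBfun_split hs, pvGoB]
        · cases hs : pvSplitB cs' with
          | nil => exact absurd hs (pvSplitB_ne_nil cs')
          | cons h t =>
            rw [show pvSplitB (c :: cs') = (c :: h) :: t from by simp [pvSplitB, hcb, hs]]
            rw [pvGoB_cons (by simp)]
            exact pvEscapeStep c hcb cs' h t hs
              (fun u hu => IH u (by simp; omega))

theorem parse_string_literal_py_spec : Claim_equal_parse_string_literal_py := by
  intro s _ _
  unfold Spec_parse_string_literal_py parse_string_literal_py parse_string_literal_py_alt
  rw [pvMain]
  unfold pvBfun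
  cases h : pvSplitB s.toList with
  | nil => exact absurd h (pvSplitB_ne_nil _)
  | cons p0 ps => simp
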